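-- pv_equiv track=rewrite | github.com/pikecracker/imperial-probe-droid | cmd/player/kit.py | fix_desc
-- ===== SOURCE A (Python) =====
-- def fix_desc(desc):
--
-- 	colors = [
-- 		'f0ff23',
-- 		'ffff33',
-- 		'F0FF23',
-- 		'ffffff',
-- 		'FFCC33',
-- 		'FF0000',
-- 		'B5E7F5',
-- 		'FFA500',
-- 		'e60000',
-- 	]
--
-- 	count = 0
-- 	for color in colors:
-- 		token = '[c][%s]' % color
-- 		while token in desc:
-- 			desc = desc.replace(token, '__**', 1)
-- 			count += 1
--
-- 	return desc.replace('\\n', '\n').replace('[-][/c]', '**__', count).replace('[-][/c]', '')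
-- ===== SOURCE B (Python) =====
-- def fix_desc(desc):
-- 	colors = (
-- 		'f0ff23',
-- 		'ffff33',
-- 		'F0FF23',
-- 		'ffffff',
-- 		'FFCC33',
-- 		'FF0000',
-- 		'B5E7F5',
-- 		'FFA500',
-- 		'e60000',
-- 	)
--
-- 	# single left-to-right scan: replace every '[c][<color>]' token with '__**'
-- 	out = []
-- 	count = 0
-- 	i = 0
-- 	n = len(desc)
-- 	while i < n:
-- 		if desc.startswith('[c][', i) and desc[i + 4:i + 10] in colors and desc[i + 10:i + 11] == ']':
-- 			out.append('__**')
-- 			count += 1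
-- 			i += 11
-- 		else:
-- 			out.append(desc[i])
-- 			i += 1
-- 	desc = ''.join(out)
--
-- 	return desc.replace('\\n', '\n').replace('[-][/c]', '**__', count).replace('[-][/c]', '')
-- ===== Notes on version B (the rewrite author's own statement) =====
-- stated objective: alternative
-- what changed: Replaces the nine per-color while-loops (each restarting a full substring search after every single replacement) with one left-to-right scan that rewrites every color markup token and counts the matches in a single traversal.
import Mathlib
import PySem

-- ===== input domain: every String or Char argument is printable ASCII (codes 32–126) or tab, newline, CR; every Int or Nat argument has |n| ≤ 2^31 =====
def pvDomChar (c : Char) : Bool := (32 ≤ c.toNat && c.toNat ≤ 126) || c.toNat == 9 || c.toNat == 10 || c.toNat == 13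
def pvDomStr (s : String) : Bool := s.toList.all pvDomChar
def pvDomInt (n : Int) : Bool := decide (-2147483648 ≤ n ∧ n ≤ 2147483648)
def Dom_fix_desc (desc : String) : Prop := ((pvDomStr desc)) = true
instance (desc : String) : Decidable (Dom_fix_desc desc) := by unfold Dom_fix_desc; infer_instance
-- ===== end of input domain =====

-- B replaces A's nine per-color while-loops (each restarting the substring search after every
-- single replacement) by ONE left-to-right scan that rewrites all color markup tokens and
-- counts the matches in a single traversal (an alternative single-pass algorithm).

-- ===== PORT A =====
-- constants shared by the two Pythons
def pvColors : List (List Char) :=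
  [['f','0','f','f','2','3'], ['f','f','f','f','3','3'], ['F','0','F','F','2','3'],
   ['f','f','f','f','f','f'], ['F','F','C','C','3','3'], ['F','F','0','0','0','0'],
   ['B','5','E','7','F','5'], ['F','F','A','5','0','0'], ['e','6','0','0','0','0']]

-- '[c][%s]' % color
def pvTok (c : List Char) : List Char := '[' :: 'c' :: ']' :: '[' :: (c ++ [']'])

def pvRepl : List Char := ['_', '_', '*', '*']     -- '__**'
def pvRepl2 : List Char := ['*', '*', '_', '_']    -- '**__'
def pvDash : List Char := ['[', '-', ']', '[', '/', 'c', ']']   -- '[-][/c]'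
def pvBackslashN : List Char := ['\\', 'n']
def pvNewline : List Char := ['\n']

-- s.replace(old, new, n): Python's count-limited replace, exact for nonempty `old`
-- (every call site passes a nonempty `old`); the fuel argument only makes the
-- recursion structural and is always sufficient at the stated fuel
def pvReplNF (t r : List Char) (f : Nat) (s : List Char) (n : Nat) : List Char :=
  match n, f with
  | 0, _ => s
  | _ + 1, 0 => s
  | n + 1, f + 1 =>
    if t <+: s then r ++ pvReplNF t r f (s.drop t.length) n
    else match s with
      | [] => []
      | a :: w => a :: pvReplNF t r f w (n + 1)

def pvReplN (s t r : List Char) (n : Nat) : List Char := pvReplNF t r (s.length + n) s n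

-- while token in desc: desc = desc.replace(token, '__**', 1); count += 1
-- (fuel = current string length, always sufficient: each iteration shrinks the string)
def pvWhileF (c : List Char) (f : Nat) (st : List Char × Nat) : List Char × Nat :=
  match f with
  | 0 => st
  | f + 1 =>
    if PySem.Chars.isIn (pvTok c) st.1 then
      pvWhileF c f (pvReplN st.1 (pvTok c) pvRepl 1, st.2 + 1)
    else st

def pvWhile (c : List Char) (st : List Char × Nat) : List Char × Nat :=
  pvWhileF c st.1.length st

-- the for-loop over the nine colors
def pvFoldW (cs : List (List Char)) (st : List Char × Nat) : List Char × Nat :=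
  cs.foldl (fun st c => pvWhile c st) st

def fix_desc (desc : String) : String :=
  let st := pvFoldW pvColors (desc.toList, 0)
  String.ofList
    (PySem.Chars.replace
      (pvReplN (PySem.Chars.replace st.1 pvBackslashN pvNewline) pvDash pvRepl2 st.2)
      pvDash [])

-- ===== PORT B =====
-- one left-to-right scan (Source B's index loop as the obvious structural recursion; the slices
-- desc[i+4:i+10] / desc[i+10:i+11] on the remaining suffix are drop/take, exact for the
-- nonnegative in-order bounds used)
def pvScanF (f : Nat) (s : List Char) : List Char × Nat :=
  match s, f with
  | [], _ => ([], 0)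
  | a :: w, 0 => (a :: w, 0)
  | a :: w, f + 1 =>
    if PySem.Chars.startswith (a :: w) ['[', 'c', ']', '['] &&
        pvColors.contains (((a :: w).drop 4).take 6) &&
        (((a :: w).drop 10).take 1 == [']']) then
      let p := pvScanF f ((a :: w).drop 11)
      (pvRepl ++ p.1, p.2 + 1)
    else
      let p := pvScanF f w
      (a :: p.1, p.2)

-- fuel = string length (always sufficient: the scan consumes ≥ 1 char per step)
def pvScan (s : List Char) : List Char × Nat := pvScanF s.length s

def fix_desc_alt (desc : String) : String :=
  let st := pvScan desc.toList
  String.ofList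
    (PySem.Chars.replace
      (pvReplN (PySem.Chars.replace st.1 pvBackslashN pvNewline) pvDash pvRepl2 st.2)
      pvDash [])

-- ===== PRECONDITION & SPEC =====
def Spec_fix_desc (desc : String) (out : String) : Prop := out = fix_desc_alt desc
instance (desc : String) (out : String) : Decidable (Spec_fix_desc desc out) := by unfold Spec_fix_desc; infer_instance

-- ===== CLAIM (what is proved, stated in full; the proofs are below) =====
def Claim_equal_fix_desc : Prop := ∀ (desc : String), Dom_fix_desc desc → Spec_fix_desc desc (fix_desc desc)

-- ===== LEMMAS AND PROOFS =====

-- shape facts about the nine colors, checked by `decide`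
def pvColorOK (c : List Char) : Prop :=
  c.length = 6 ∧ (∀ ch ∈ c, ch ≠ '_' ∧ ch ≠ '[') ∧ c.head? ≠ some 'c'

theorem pvColors_ok : ∀ c ∈ pvColors, pvColorOK c := by
  simp [pvColors, pvColorOK]

theorem pvColors_nodup : pvColors.Nodup := by simp [pvColors]

theorem pvTok_ne_nil (c : List Char) : pvTok c ≠ [] := by simp [pvTok]

-- unfolding equations of the fuel-structured primitives, and fuel irrelevance
theorem pvReplNF_n_zero (t r : List Char) (f : Nat) (s : List Char) :
    pvReplNF t r f s 0 = s := by
  cases f <;> simp [pvReplNF]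

theorem pvReplNF_succ_succ (t r : List Char) (f : Nat) (s : List Char) (n : Nat) :
    pvReplNF t r (f + 1) s (n + 1)
    = if t <+: s then r ++ pvReplNF t r f (s.drop t.length) n
      else match s with
        | [] => []
        | a :: w => a :: pvReplNF t r f w (n + 1) := by
  simp [pvReplNF]

theorem pvReplNF_irrel (t r : List Char) : ∀ (f g : Nat) (s : List Char) (n : Nat),
    s.length + n ≤ f → s.length + n ≤ g → pvReplNF t r f s n = pvReplNF t r g s n := by
  intro f
  induction f with
  | zero =>
    intro g s n h1 _
    have hn : n = 0 := by omega
    subst hn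
    rw [pvReplNF_n_zero, pvReplNF_n_zero]
  | succ f ih =>
    intro g s n h1 h2
    cases n with
    | zero => rw [pvReplNF_n_zero, pvReplNF_n_zero]
    | succ n =>
      cases g with
      | zero => omega
      | succ g =>
        rw [pvReplNF_succ_succ, pvReplNF_succ_succ]
        by_cases hp : t <+: s
        · simp only [hp, if_true]
          rw [ih g (s.drop t.length) n (by simp; omega) (by simp; omega)]
        · simp only [hp, if_false]
          cases s with
          | nil => rfl
          | cons a w =>
            simp only [List.length_cons] at h1 h2
            show a :: pvReplNF t r f w (n + 1) = a :: pvReplNF t r g w (n + 1)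
            rw [ih g w (n + 1) (by omega) (by omega)]

theorem pvReplN_eqF {s : List Char} {n f : Nat} (t r : List Char) (h : s.length + n ≤ f) :
    pvReplN s t r n = pvReplNF t r f s n :=
  pvReplNF_irrel t r _ f s n le_rfl h

theorem pvReplN_zero (s t r : List Char) : pvReplN s t r 0 = s := by
  rw [pvReplN, pvReplNF_n_zero]

theorem pvReplN_succ_prefix {t s : List Char} (r : List Char) (n : Nat) (h : t <+: s) :
    pvReplN s t r (n + 1) = r ++ pvReplN (s.drop t.length) t r n := by
  rw [pvReplN_eqF t r (show s.length + (n + 1) ≤ (s.length + n) + 1 by omega),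
      pvReplNF_succ_succ]
  simp only [h, if_true]
  rw [← pvReplN_eqF t r (by simp only [List.length_drop]; omega)]

theorem pvReplN_cons_not_prefix {t : List Char} {a : Char} {w : List Char}
    (r : List Char) (n : Nat) (h : ¬ t <+: a :: w) :
    pvReplN (a :: w) t r n = a :: pvReplN w t r n := by
  cases n with
  | zero => rw [pvReplN_zero, pvReplN_zero]
  | succ n =>
    rw [pvReplN_eqF t r (show (a :: w).length + (n + 1) ≤ (w.length + (n + 1)) + 1 by
          simp only [List.length_cons]; omega),
        pvReplNF_succ_succ]
    simp only [h, if_false]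
    rw [← pvReplN_eqF t r le_rfl]

theorem pvReplN_nil_not_prefix {t : List Char} (r : List Char) (n : Nat)
    (h : ¬ t <+: ([] : List Char)) : pvReplN [] t r n = [] := by
  cases n with
  | zero => rw [pvReplN_zero]
  | succ n =>
    rw [pvReplN_eqF t r (show ([] : List Char).length + (n + 1) ≤ n + 1 by simp),
        pvReplNF_succ_succ]
    simp [h]

-- a successful single replacement of the (length ≥ 5) token by '__**' strictly shrinks
theorem pvLen_replN_one_lt (s t : List Char) (hinf : t <:+: s) (ht : 4 < t.length) :
    (pvReplN s t pvRepl 1).length < s.length := by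
  induction s with
  | nil =>
    rcases List.infix_nil.mp hinf with rfl
    simp at ht
  | cons a w ih =>
    by_cases hp : t <+: a :: w
    · have hle := hp.length_le
      rw [pvReplN_succ_prefix _ 0 hp, pvReplN_zero]
      have h4 : pvRepl.length = 4 := rfl
      rw [List.length_append, h4, List.length_drop]
      have : t.length ≤ (a :: w).length := hle
      omega
    · have hw : t <:+: w := by
        rcases List.infix_cons_iff.mp hinf with h | h
        · exact absurd h hp
        · exact h
      rw [pvReplN_cons_not_prefix _ 1 hp]
      have := ih hw
      simp only [List.length_cons]
      omega

theorem pvLen6 {c : List Char} (h : c.length = 6) :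
    ∃ a1 a2 a3 a4 a5 a6, c = [a1, a2, a3, a4, a5, a6] := by
  rcases c with _ | ⟨a1, c⟩; · simp at h
  rcases c with _ | ⟨a2, c⟩; · simp at h
  rcases c with _ | ⟨a3, c⟩; · simp at h
  rcases c with _ | ⟨a4, c⟩; · simp at h
  rcases c with _ | ⟨a5, c⟩; · simp at h
  rcases c with _ | ⟨a6, c⟩; · simp at h
  have : c = [] := by simpa using h
  exact ⟨a1, a2, a3, a4, a5, a6, by rw [this]⟩

theorem pvTok_no_us {c : List Char} (hc : pvColorOK c) : ∀ ch ∈ pvTok c, ch ≠ '_' := by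
  intro ch hch
  simp only [pvTok, List.mem_cons, List.mem_append] at hch
  rcases hch with rfl | rfl | rfl | rfl | h | rfl | h2
  · decide
  · decide
  · decide
  · decide
  · exact (hc.2.1 ch h).1
  · decide
  · simp at h2

theorem pvIsIn_nil {t : List Char} (h : t ≠ []) : PySem.Chars.isIn t [] = false := by
  rw [PySem.Chars.isIn_eq_false_iff]
  simpa [List.infix_nil] using h

theorem pvIsIn_cons_not_prefix {t : List Char} {a : Char} {w : List Char}
    (h : ¬ t <+: a :: w) : PySem.Chars.isIn t (a :: w) = PySem.Chars.isIn t w := by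
  by_cases h2 : PySem.Chars.isIn t w = true
  · rw [h2]
    exact (PySem.Chars.isIn_iff_infix _ _).mpr
      (List.infix_cons_iff.mpr (Or.inr ((PySem.Chars.isIn_iff_infix _ _).mp h2)))
  · rw [Bool.not_eq_true] at h2
    rw [h2, PySem.Chars.isIn_eq_false_iff]
    intro hinf
    rcases List.infix_cons_iff.mp hinf with hh | hh
    · exact h hh
    · exact ((PySem.Chars.isIn_eq_false_iff _ _).mp h2) hh

theorem pvNot_prefix_head_ne {x a : Char} {l m : List Char} (h : x ≠ a) :
    ¬ (x :: l) <+: (a :: m) := by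
  intro hp
  exact h (List.cons_prefix_cons.mp hp).1

theorem pvTok_not_prefix_cons {c : List Char} {a : Char} {m : List Char} (h : a ≠ '[') :
    ¬ pvTok c <+: a :: m := by
  rw [pvTok]; exact pvNot_prefix_head_ne (fun he => h he.symm)

-- a nonempty underscore-free pattern that is a prefix of a one-shot replacement result
-- was already a prefix of the input (the replacement '__**' cannot produce it)
theorem pvReflN (t : List Char) : ∀ (x t' : List Char), (∀ ch ∈ t', ch ≠ '_') → t' ≠ [] →
    t' <+: pvReplN x t pvRepl 1 → t' <+: x := by
  intro x
  induction x with
  | nil =>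
    intro t' hch hne hp
    by_cases h : t <+: ([] : List Char)
    · rw [pvReplN_succ_prefix _ 0 h, pvReplN_zero] at hp
      rcases t' with _ | ⟨b, t₂⟩
      · exact absurd rfl hne
      · have := (List.cons_prefix_cons.mp (by simpa [pvRepl] using hp)).1
        exact absurd this (hch b (by simp))
    · rw [pvReplN_nil_not_prefix _ 1 h] at hp
      exact hp
  | cons a w ih =>
    intro t' hch hne hp
    by_cases h : t <+: a :: w
    · rw [pvReplN_succ_prefix _ 0 h, pvReplN_zero] at hp
      rcases t' with _ | ⟨b, t₂⟩
      · exact absurd rfl hne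
      · have := (List.cons_prefix_cons.mp (by simpa [pvRepl] using hp)).1
        exact absurd this (hch b (by simp))
    · rw [pvReplN_cons_not_prefix _ 1 h] at hp
      rcases t' with _ | ⟨b, t₂⟩
      · exact absurd rfl hne
      · obtain ⟨rfl, h₂⟩ := List.cons_prefix_cons.mp hp
        by_cases ht₂ : t₂ = []
        · subst ht₂; exact List.cons_prefix_cons.mpr ⟨rfl, List.nil_prefix⟩
        · exact List.cons_prefix_cons.mpr
            ⟨rfl, ih t₂ (fun ch hm => hch ch (by simp [hm])) ht₂ h₂⟩

theorem pvLen_W {c : List Char} {x : List Char} (h : PySem.Chars.isIn (pvTok c) x = true) :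
    (pvReplN x (pvTok c) pvRepl 1).length < x.length :=
  pvLen_replN_one_lt _ _ ((PySem.Chars.isIn_iff_infix _ _).mp h) (by simp [pvTok])

theorem pvWhileF_zero (c : List Char) (st : List Char × Nat) : pvWhileF c 0 st = st := by
  simp [pvWhileF]

theorem pvWhileF_succ (c : List Char) (f : Nat) (st : List Char × Nat) :
    pvWhileF c (f + 1) st
    = if PySem.Chars.isIn (pvTok c) st.1 then
        pvWhileF c f (pvReplN st.1 (pvTok c) pvRepl 1, st.2 + 1)
      else st := by
  simp [pvWhileF]

theorem pvWhileF_irrel (c : List Char) : ∀ (f g : Nat) (x : List Char) (n : Nat),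
    x.length ≤ f → x.length ≤ g → pvWhileF c f (x, n) = pvWhileF c g (x, n) := by
  intro f
  induction f with
  | zero =>
    intro g x n h1 _
    have hx : x = [] := List.eq_nil_of_length_eq_zero (Nat.le_zero.mp h1)
    subst hx
    rw [pvWhileF_zero]
    cases g with
    | zero => rw [pvWhileF_zero]
    | succ g => rw [pvWhileF_succ]; simp [pvIsIn_nil (pvTok_ne_nil c)]
  | succ f ih =>
    intro g x n h1 h2
    by_cases hin : PySem.Chars.isIn (pvTok c) x = true
    · have hne : x ≠ [] := by
        intro he; subst he
        rw [pvIsIn_nil (pvTok_ne_nil c)] at hin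
        exact Bool.false_ne_true hin
      have hxpos : 0 < x.length := List.length_pos_of_ne_nil hne
      cases g with
      | zero => omega
      | succ g =>
        rw [pvWhileF_succ, pvWhileF_succ]
        simp only [hin, if_true]
        have hlt := pvLen_W (c := c) hin
        exact ih g _ _ (by omega) (by omega)
    · cases g with
      | zero =>
        have hx : x = [] := List.eq_nil_of_length_eq_zero (Nat.le_zero.mp h2)
        subst hx
        rw [pvWhileF_zero, pvWhileF_succ]
        simp [hin]
      | succ g =>
        rw [pvWhileF_succ, pvWhileF_succ]
        simp [hin]

theorem pvW_step (c x : List Char) (n : Nat) (hin : PySem.Chars.isIn (pvTok c) x = true) :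
    pvWhile c (x, n) = pvWhile c (pvReplN x (pvTok c) pvRepl 1, n + 1) := by
  have hne : x ≠ [] := by
    intro he; subst he
    rw [pvIsIn_nil (pvTok_ne_nil c)] at hin
    exact Bool.false_ne_true hin
  have hxpos : 0 < x.length := List.length_pos_of_ne_nil hne
  have hlt := pvLen_W (c := c) hin
  show pvWhileF c x.length (x, n) = pvWhileF c (pvReplN x (pvTok c) pvRepl 1).length _
  obtain ⟨m, hm⟩ : ∃ m, x.length = m + 1 := ⟨x.length - 1, by omega⟩
  rw [hm, pvWhileF_succ]
  simp only [hin, if_true]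
  exact pvWhileF_irrel c m _ _ _ (by omega) le_rfl

theorem pvW_stop (c x : List Char) (n : Nat) (hin : ¬ PySem.Chars.isIn (pvTok c) x = true) :
    pvWhile c (x, n) = (x, n) := by
  show pvWhileF c x.length (x, n) = (x, n)
  cases hx : x with
  | nil =>
    subst hx
    show pvWhileF c 0 ([], n) = ([], n)
    rw [pvWhileF_zero]
  | cons a w =>
    subst hx
    rw [List.length_cons, pvWhileF_succ]
    simp [hin]

theorem pvW_nil (c : List Char) (n : Nat) : pvWhile c ([], n) = ([], n) :=
  pvW_stop c [] n (by simp [pvIsIn_nil (pvTok_ne_nil c)])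

-- the while-loop only adds to the counter
theorem pvW_shift (c : List Char) : ∀ (N : Nat) (x : List Char), x.length ≤ N → ∀ n,
    pvWhile c (x, n) = ((pvWhile c (x, 0)).1, n + (pvWhile c (x, 0)).2) := by
  intro N
  induction N with
  | zero =>
    intro x hx n
    have : x = [] := List.eq_nil_of_length_eq_zero (Nat.le_zero.mp hx)
    subst this
    rw [pvW_nil, pvW_nil]
    simp
  | succ N ih =>
    intro x hx n
    by_cases hin : PySem.Chars.isIn (pvTok c) x = true
    · have hlt := pvLen_W (c := c) hin
      have hx' : (pvReplN x (pvTok c) pvRepl 1).length ≤ N := by omega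
      rw [pvW_step c x n hin, pvW_step c x 0 hin,
          ih _ hx' (n + 1), ih _ hx' (0 + 1)]
      simp only [Prod.mk.injEq, true_and]
      omega
    · rw [pvW_stop c x n hin, pvW_stop c x 0 hin]
      simp

theorem pvW_succ (c : List Char) (x : List Char) (n : Nat) :
    pvWhile c (x, n + 1) = ((pvWhile c (x, n)).1, (pvWhile c (x, n)).2 + 1) := by
  rw [pvW_shift c x.length x le_rfl (n + 1), pvW_shift c x.length x le_rfl n]
  simp only [Prod.mk.injEq, true_and]
  omega

-- prefix reflection through the whole while-loop
theorem pvW_refl (c : List Char) : ∀ (N : Nat) (x : List Char), x.length ≤ N →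
    ∀ (n : Nat) (t' : List Char), (∀ ch ∈ t', ch ≠ '_') → t' ≠ [] →
    t' <+: (pvWhile c (x, n)).1 → t' <+: x := by
  intro N
  induction N with
  | zero =>
    intro x hx n t' hch hne hp
    have : x = [] := List.eq_nil_of_length_eq_zero (Nat.le_zero.mp hx)
    subst this
    rw [pvW_nil] at hp
    exact hp
  | succ N ih =>
    intro x hx n t' hch hne hp
    by_cases hin : PySem.Chars.isIn (pvTok c) x = true
    · have hlt := pvLen_W (c := c) hin
      rw [pvW_step c x n hin] at hp
      exact pvReflN _ _ _ hch hne (ih _ (by omega) _ _ hch hne hp)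
    · rw [pvW_stop c x n hin] at hp
      exact hp

-- pass-through of a prefix block p the token can never match into
theorem pvW_pass (c : List Char) (p : List Char)
    (hIs : ∀ y, PySem.Chars.isIn (pvTok c) (p ++ y) = PySem.Chars.isIn (pvTok c) y)
    (hRep : ∀ y, pvReplN (p ++ y) (pvTok c) pvRepl 1 = p ++ pvReplN y (pvTok c) pvRepl 1) :
    ∀ (N : Nat) (x : List Char), x.length ≤ N → ∀ n,
    pvWhile c (p ++ x, n) = (p ++ (pvWhile c (x, n)).1, (pvWhile c (x, n)).2) := by
  intro N
  induction N with
  | zero =>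
    intro x hx n
    have : x = [] := List.eq_nil_of_length_eq_zero (Nat.le_zero.mp hx)
    subst this
    rw [pvW_nil,
        pvW_stop c (p ++ []) n (by rw [hIs]; simp [pvIsIn_nil (pvTok_ne_nil c)])]
  | succ N ih =>
    intro x hx n
    by_cases hin : PySem.Chars.isIn (pvTok c) x = true
    · have hlt := pvLen_W (c := c) hin
      rw [pvW_step c (p ++ x) n (by rw [hIs]; exact hin), hRep,
          pvW_step c x n hin]
      exact ih _ (by omega) (n + 1)
    · rw [pvW_stop c (p ++ x) n (by rw [hIs]; exact hin), pvW_stop c x n hin]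

-- pass-through of a single char that never begins a match, kept such by reflection
theorem pvW_cons (c : List Char) (hc : pvColorOK c) : ∀ (N : Nat) (x : List Char),
    x.length ≤ N → ∀ (n : Nat) (a : Char), ¬ pvTok c <+: a :: x →
    pvWhile c (a :: x, n) = (a :: (pvWhile c (x, n)).1, (pvWhile c (x, n)).2) := by
  intro N
  induction N with
  | zero =>
    intro x hx n a h
    have : x = [] := List.eq_nil_of_length_eq_zero (Nat.le_zero.mp hx)
    subst this
    rw [pvW_nil,
        pvW_stop c [a] n (by rw [pvIsIn_cons_not_prefix h]; simp [pvIsIn_nil (pvTok_ne_nil c)])]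
  | succ N ih =>
    intro x hx n a h
    by_cases hin : PySem.Chars.isIn (pvTok c) x = true
    · have hlt := pvLen_W (c := c) hin
      rw [pvW_step c (a :: x) n (by rw [pvIsIn_cons_not_prefix h]; exact hin),
          pvReplN_cons_not_prefix pvRepl 1 h,
          pvW_step c x n hin]
      have h' : ¬ pvTok c <+: a :: pvReplN x (pvTok c) pvRepl 1 := by
        intro hp
        rw [pvTok] at hp
        obtain ⟨rfl, h₂⟩ := List.cons_prefix_cons.mp hp
        have hsub : ('c' :: ']' :: '[' :: (c ++ [']'])) <+: x := by
          refine pvReflN _ _ _ ?_ (by simp) h₂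
          intro ch hm
          have hmem : ch ∈ pvTok c := by
            rw [pvTok]; simp only [List.mem_cons] at hm ⊢; tauto
          exact pvTok_no_us hc ch hmem
        exact h (by rw [pvTok]; exact List.cons_prefix_cons.mpr ⟨rfl, hsub⟩)
      exact ih _ (by omega) (n + 1) a h'
    · rw [pvW_stop c (a :: x) n (by rw [pvIsIn_cons_not_prefix h]; exact hin),
          pvW_stop c x n hin]

-- '__**' cannot be matched into: single-step pass-through facts
theorem pvPass_repl_rep (c : List Char) (y : List Char) :
    pvReplN (pvRepl ++ y) (pvTok c) pvRepl 1 = pvRepl ++ pvReplN y (pvTok c) pvRepl 1 := by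
  have h1 : ∀ (a : Char) (m : List Char), a ≠ '[' → ¬ pvTok c <+: a :: m :=
    fun a m h => pvTok_not_prefix_cons h
  simp only [pvRepl, List.cons_append, List.nil_append]
  rw [pvReplN_cons_not_prefix _ 1 (h1 _ _ (by decide)),
      pvReplN_cons_not_prefix _ 1 (h1 _ _ (by decide)),
      pvReplN_cons_not_prefix _ 1 (h1 _ _ (by decide)),
      pvReplN_cons_not_prefix _ 1 (h1 _ _ (by decide))]

theorem pvPass_repl_isIn (c : List Char) (y : List Char) :
    PySem.Chars.isIn (pvTok c) (pvRepl ++ y) = PySem.Chars.isIn (pvTok c) y := by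
  have h1 : ∀ (a : Char) (m : List Char), a ≠ '[' → ¬ pvTok c <+: a :: m :=
    fun a m h => pvTok_not_prefix_cons h
  simp only [pvRepl, List.cons_append, List.nil_append]
  rw [pvIsIn_cons_not_prefix (h1 _ _ (by decide)),
      pvIsIn_cons_not_prefix (h1 _ _ (by decide)),
      pvIsIn_cons_not_prefix (h1 _ _ (by decide)),
      pvIsIn_cons_not_prefix (h1 _ _ (by decide))]

theorem pvTok_inj {c c' : List Char} (h : pvTok c' = pvTok c) : c' = c := by
  simp only [pvTok, List.cons.injEq, true_and] at h
  exact List.append_cancel_right h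

-- a different color's token never matches at the very front of a leading token
theorem pvTok_not_prefix_tok {c c' : List Char} (hc : pvColorOK c) (hc' : pvColorOK c')
    (hne : c' ≠ c) (y : List Char) : ¬ pvTok c' <+: pvTok c ++ y := by
  intro h
  have hlen : (pvTok c').length = (pvTok c).length := by
    simp [pvTok, hc.1, hc'.1]
  have he : pvTok c' = (pvTok c ++ y).take (pvTok c').length := List.prefix_iff_eq_take.mp h
  rw [hlen, List.take_left' rfl] at he
  exact hne (pvTok_inj he)

theorem pvPass_tok_rep {c c' : List Char} (hc : pvColorOK c) (hc' : pvColorOK c')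
    (hne : c' ≠ c) (y : List Char) :
    pvReplN (pvTok c ++ y) (pvTok c') pvRepl 1 = pvTok c ++ pvReplN y (pvTok c') pvRepl 1 := by
  have hnp0 := pvTok_not_prefix_tok hc hc' hne y
  obtain ⟨a1, a2, a3, a4, a5, a6, rfl⟩ := pvLen6 hc.1
  have ha : ∀ ch ∈ [a1, a2, a3, a4, a5, a6], ch ≠ '[' := fun ch hm => (hc.2.1 ch hm).2
  have ha1c : a1 ≠ 'c' := by intro he; exact hc.2.2 (by simp [he])
  have hnp3 : ∀ m : List Char, ¬ pvTok c' <+: '[' :: a1 :: m := by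
    intro m hp
    rw [pvTok] at hp
    exact ha1c ((List.cons_prefix_cons.mp (List.cons_prefix_cons.mp hp).2).1).symm
  have hnp0' : ¬ pvTok c' <+:
      ('[' :: 'c' :: ']' :: '[' :: a1 :: a2 :: a3 :: a4 :: a5 :: a6 :: ']' :: y) := by
    simpa only [pvTok, List.cons_append, List.nil_append] using hnp0
  show pvReplN ('[' :: 'c' :: ']' :: '[' :: a1 :: a2 :: a3 :: a4 :: a5 :: a6 :: ']' :: y)
      (pvTok c') pvRepl 1
    = '[' :: 'c' :: ']' :: '[' :: a1 :: a2 :: a3 :: a4 :: a5 :: a6 :: ']' ::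
        pvReplN y (pvTok c') pvRepl 1
  rw [pvReplN_cons_not_prefix _ 1 hnp0',
      pvReplN_cons_not_prefix _ 1 (pvTok_not_prefix_cons (by decide)),
      pvReplN_cons_not_prefix _ 1 (pvTok_not_prefix_cons (by decide)),
      pvReplN_cons_not_prefix _ 1 (hnp3 _),
      pvReplN_cons_not_prefix _ 1 (pvTok_not_prefix_cons (ha a1 (by simp))),
      pvReplN_cons_not_prefix _ 1 (pvTok_not_prefix_cons (ha a2 (by simp))),
      pvReplN_cons_not_prefix _ 1 (pvTok_not_prefix_cons (ha a3 (by simp))),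
      pvReplN_cons_not_prefix _ 1 (pvTok_not_prefix_cons (ha a4 (by simp))),
      pvReplN_cons_not_prefix _ 1 (pvTok_not_prefix_cons (ha a5 (by simp))),
      pvReplN_cons_not_prefix _ 1 (pvTok_not_prefix_cons (ha a6 (by simp))),
      pvReplN_cons_not_prefix _ 1 (pvTok_not_prefix_cons (by decide))]

theorem pvPass_tok_isIn {c c' : List Char} (hc : pvColorOK c) (hc' : pvColorOK c')
    (hne : c' ≠ c) (y : List Char) :
    PySem.Chars.isIn (pvTok c') (pvTok c ++ y) = PySem.Chars.isIn (pvTok c') y := by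
  have hnp0 := pvTok_not_prefix_tok hc hc' hne y
  obtain ⟨a1, a2, a3, a4, a5, a6, rfl⟩ := pvLen6 hc.1
  have ha : ∀ ch ∈ [a1, a2, a3, a4, a5, a6], ch ≠ '[' := fun ch hm => (hc.2.1 ch hm).2
  have ha1c : a1 ≠ 'c' := by intro he; exact hc.2.2 (by simp [he])
  have hnp3 : ∀ m : List Char, ¬ pvTok c' <+: '[' :: a1 :: m := by
    intro m hp
    rw [pvTok] at hp
    exact ha1c ((List.cons_prefix_cons.mp (List.cons_prefix_cons.mp hp).2).1).symm
  have hnp0' : ¬ pvTok c' <+: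
      ('[' :: 'c' :: ']' :: '[' :: a1 :: a2 :: a3 :: a4 :: a5 :: a6 :: ']' :: y) := by
    simpa only [pvTok, List.cons_append, List.nil_append] using hnp0
  show PySem.Chars.isIn (pvTok c')
      ('[' :: 'c' :: ']' :: '[' :: a1 :: a2 :: a3 :: a4 :: a5 :: a6 :: ']' :: y)
    = PySem.Chars.isIn (pvTok c') y
  rw [pvIsIn_cons_not_prefix hnp0',
      pvIsIn_cons_not_prefix (pvTok_not_prefix_cons (by decide)),
      pvIsIn_cons_not_prefix (pvTok_not_prefix_cons (by decide)),
      pvIsIn_cons_not_prefix (hnp3 _),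
      pvIsIn_cons_not_prefix (pvTok_not_prefix_cons (ha a1 (by simp))),
      pvIsIn_cons_not_prefix (pvTok_not_prefix_cons (ha a2 (by simp))),
      pvIsIn_cons_not_prefix (pvTok_not_prefix_cons (ha a3 (by simp))),
      pvIsIn_cons_not_prefix (pvTok_not_prefix_cons (ha a4 (by simp))),
      pvIsIn_cons_not_prefix (pvTok_not_prefix_cons (ha a5 (by simp))),
      pvIsIn_cons_not_prefix (pvTok_not_prefix_cons (ha a6 (by simp))),
      pvIsIn_cons_not_prefix (pvTok_not_prefix_cons (by decide))]

-- fold-level lemmas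
theorem pvF_cons_def (c : List Char) (cs : List (List Char)) (st : List Char × Nat) :
    pvFoldW (c :: cs) st = pvFoldW cs (pvWhile c st) := by
  simp [pvFoldW]

theorem pvF_shift : ∀ (cs : List (List Char)) (x : List Char) (n : Nat),
    pvFoldW cs (x, n) = ((pvFoldW cs (x, 0)).1, n + (pvFoldW cs (x, 0)).2) := by
  intro cs
  induction cs with
  | nil => intro x n; simp [pvFoldW]
  | cons c cs ih =>
    intro x n
    rw [pvF_cons_def, pvF_cons_def,
        pvW_shift c x.length x le_rfl n]
    conv_rhs => rw [← Prod.mk.eta (p := pvWhile c (x, 0))]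
    rw [ih (pvWhile c (x, 0)).1 (n + (pvWhile c (x, 0)).2),
        ih (pvWhile c (x, 0)).1 (pvWhile c (x, 0)).2]
    simp only [Prod.mk.injEq, true_and]
    omega

theorem pvF_succ (cs : List (List Char)) (x : List Char) (n : Nat) :
    pvFoldW cs (x, n + 1) = ((pvFoldW cs (x, n)).1, (pvFoldW cs (x, n)).2 + 1) := by
  rw [pvF_shift cs x (n + 1), pvF_shift cs x n]
  simp only [Prod.mk.injEq, true_and]
  omega

theorem pvF_pass_repl : ∀ (cs : List (List Char)) (x : List Char) (n : Nat),
    pvFoldW cs (pvRepl ++ x, n) = (pvRepl ++ (pvFoldW cs (x, n)).1, (pvFoldW cs (x, n)).2) := by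
  intro cs
  induction cs with
  | nil => intro x n; simp [pvFoldW]
  | cons c cs ih =>
    intro x n
    rw [pvF_cons_def, pvF_cons_def,
        pvW_pass c pvRepl (pvPass_repl_isIn c) (pvPass_repl_rep c) x.length x le_rfl n,
        ih (pvWhile c (x, n)).1 (pvWhile c (x, n)).2]

theorem pvF_pass_tok (c : List Char) (hc : pvColorOK c) :
    ∀ (cs : List (List Char)), (∀ c' ∈ cs, pvColorOK c') → c ∉ cs →
    ∀ (x : List Char) (n : Nat),
    pvFoldW cs (pvTok c ++ x, n) = (pvTok c ++ (pvFoldW cs (x, n)).1, (pvFoldW cs (x, n)).2) := by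
  intro cs
  induction cs with
  | nil => intro _ _ x n; simp [pvFoldW]
  | cons c' cs ih =>
    intro hok hnm x n
    have hc' : pvColorOK c' := hok c' (by simp)
    have hne : c' ≠ c := by intro he; exact hnm (by simp [he])
    rw [pvF_cons_def, pvF_cons_def,
        pvW_pass c' (pvTok c) (pvPass_tok_isIn hc hc' hne) (pvPass_tok_rep hc hc' hne)
          x.length x le_rfl n,
        ih (fun a ha => hok a (by simp [ha])) (fun hmem => hnm (by simp [hmem]))
          (pvWhile c' (x, n)).1 (pvWhile c' (x, n)).2]

theorem pvF_char : ∀ (cs : List (List Char)), (∀ c ∈ cs, pvColorOK c) →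
    ∀ (x : List Char) (n : Nat) (a : Char), (∀ c ∈ cs, ¬ pvTok c <+: a :: x) →
    pvFoldW cs (a :: x, n) = (a :: (pvFoldW cs (x, n)).1, (pvFoldW cs (x, n)).2) := by
  intro cs
  induction cs with
  | nil => intro _ x n a _; simp [pvFoldW]
  | cons c cs ih =>
    intro hok x n a H
    have hc : pvColorOK c := hok c (by simp)
    rw [pvF_cons_def, pvF_cons_def, pvW_cons c hc x.length x le_rfl n a (H c (by simp))]
    have H' : ∀ c' ∈ cs, ¬ pvTok c' <+: a :: (pvWhile c (x, n)).1 := by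
      intro c' hm hp
      have hc'ok : pvColorOK c' := hok c' (by simp [hm])
      rw [pvTok] at hp
      obtain ⟨rfl, h₂⟩ := List.cons_prefix_cons.mp hp
      have hsub : ('c' :: ']' :: '[' :: (c' ++ [']'])) <+: x := by
        refine pvW_refl c _ _ le_rfl _ _ ?_ (by simp) h₂
        intro ch hm2
        have hmem : ch ∈ pvTok c' := by
          rw [pvTok]; simp only [List.mem_cons] at hm2 ⊢; tauto
        exact pvTok_no_us hc'ok ch hmem
      exact H c' (by simp [hm]) (by rw [pvTok]; exact List.cons_prefix_cons.mpr ⟨rfl, hsub⟩)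
    rw [ih (fun a ha => hok a (by simp [ha])) (pvWhile c (x, n)).1 (pvWhile c (x, n)).2 a H']

theorem pvF_nil (cs : List (List Char)) (n : Nat) : pvFoldW cs ([], n) = ([], n) := by
  induction cs with
  | nil => simp [pvFoldW]
  | cons c cs ih =>
    rw [pvF_cons_def, pvW_nil]
    exact ih

theorem pvScanF_nil (f : Nat) : pvScanF f [] = ([], 0) := by
  cases f <;> simp [pvScanF]

theorem pvScanF_succ (f : Nat) (a : Char) (w : List Char) :
    pvScanF (f + 1) (a :: w)
    = if PySem.Chars.startswith (a :: w) ['[', 'c', ']', '['] &&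
          pvColors.contains (((a :: w).drop 4).take 6) &&
          (((a :: w).drop 10).take 1 == [']']) then
        (pvRepl ++ (pvScanF f ((a :: w).drop 11)).1, (pvScanF f ((a :: w).drop 11)).2 + 1)
      else (a :: (pvScanF f w).1, (pvScanF f w).2) := by
  simp [pvScanF]

theorem pvScanF_irrel : ∀ (f g : Nat) (s : List Char),
    s.length ≤ f → s.length ≤ g → pvScanF f s = pvScanF g s := by
  intro f
  induction f with
  | zero =>
    intro g s h1 _
    have hs : s = [] := List.eq_nil_of_length_eq_zero (Nat.le_zero.mp h1)
    subst hs
    rw [pvScanF_nil, pvScanF_nil]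
  | succ f ih =>
    intro g s h1 h2
    cases s with
    | nil => rw [pvScanF_nil, pvScanF_nil]
    | cons a w =>
      cases g with
      | zero => simp at h2
      | succ g =>
        rw [pvScanF_succ, pvScanF_succ]
        simp only [List.length_cons] at h1 h2
        rw [ih g ((a :: w).drop 11) (by simp; omega) (by simp; omega),
            ih g w (by omega) (by omega)]

theorem pvScan_cons_eq (a : Char) (w : List Char) :
    pvScan (a :: w)
    = if PySem.Chars.startswith (a :: w) ['[', 'c', ']', '['] &&
          pvColors.contains (((a :: w).drop 4).take 6) &&
          (((a :: w).drop 10).take 1 == [']']) then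
        (pvRepl ++ (pvScan ((a :: w).drop 11)).1, (pvScan ((a :: w).drop 11)).2 + 1)
      else (a :: (pvScan w).1, (pvScan w).2) := by
  show pvScanF (w.length + 1) (a :: w) = _
  rw [pvScanF_succ,
      pvScanF_irrel w.length ((a :: w).drop 11).length ((a :: w).drop 11)
        (by simp) le_rfl]
  rfl

-- scan on a string beginning with a color token
theorem pvScan_tok {c : List Char} (hmem : c ∈ pvColors) (u : List Char) :
    pvScan (pvTok c ++ u) = (pvRepl ++ (pvScan u).1, (pvScan u).2 + 1) := by
  have hok := pvColors_ok c hmem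
  obtain ⟨a1, a2, a3, a4, a5, a6, rfl⟩ := pvLen6 hok.1
  show pvScan ('[' :: 'c' :: ']' :: '[' :: a1 :: a2 :: a3 :: a4 :: a5 :: a6 :: ']' :: u) = _
  rw [pvScan_cons_eq]
  have h1 : PySem.Chars.startswith
      ('[' :: 'c' :: ']' :: '[' :: a1 :: a2 :: a3 :: a4 :: a5 :: a6 :: ']' :: u)
      ['[', 'c', ']', '['] = true :=
    (PySem.Chars.startswith_iff _ _).mpr ⟨a1 :: a2 :: a3 :: a4 :: a5 :: a6 :: ']' :: u, rfl⟩
  have h2 : (('[' :: 'c' :: ']' :: '[' :: a1 :: a2 :: a3 :: a4 :: a5 :: a6 :: ']' :: u).drop 4).take 6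
      = [a1, a2, a3, a4, a5, a6] := by simp
  have h3 : pvColors.contains ([a1, a2, a3, a4, a5, a6]) = true :=
    List.contains_iff_mem.mpr hmem
  simp only [h1, h3, List.drop_succ_cons, List.drop_zero, List.take_succ_cons, List.take_zero, Bool.and_true, beq_self_eq_true, if_true]

-- the scan condition certifies a leading token
theorem pvScan_cond {a : Char} {w : List Char}
    (h : (PySem.Chars.startswith (a :: w) ['[', 'c', ']', '['] &&
        pvColors.contains (((a :: w).drop 4).take 6) &&
        (((a :: w).drop 10).take 1 == [']'])) = true) :
    ∃ c ∈ pvColors, pvTok c <+: a :: w := by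
  rw [Bool.and_eq_true, Bool.and_eq_true] at h
  obtain ⟨⟨hsw, hct⟩, hbr⟩ := h
  obtain ⟨z, hz⟩ := (PySem.Chars.startswith_iff _ _).mp hsw
  have hmem : ((a :: w).drop 4).take 6 ∈ pvColors := List.contains_iff_mem.mp hct
  have hdrop4 : (a :: w).drop 4 = z := by
    rw [← hz]; exact List.drop_left' rfl
  have hdrop10 : (a :: w).drop 10 = z.drop 6 := by
    have : (a :: w).drop 10 = ((a :: w).drop 4).drop 6 := by
      rw [List.drop_drop]
    rw [this, hdrop4]
  have hbeq : ((a :: w).drop 10).take 1 = [']'] := eq_of_beq hbr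
  rw [hdrop10] at hbeq
  obtain ⟨v, hv⟩ : ∃ v, z.drop 6 = ']' :: v := by
    cases hzz : z.drop 6 with
    | nil => rw [hzz] at hbeq; simp at hbeq
    | cons b v =>
      rw [hzz] at hbeq
      simp only [List.take_succ_cons, List.take_zero, List.cons.injEq, and_true] at hbeq
      exact ⟨v, by rw [hbeq]⟩
  refine ⟨((a :: w).drop 4).take 6, hmem, v, ?_⟩
  rw [pvTok, hdrop4]
  have hzsplit : z = z.take 6 ++ z.drop 6 := (List.take_append_drop 6 z).symm
  rw [← hz]
  simp only [List.cons_append, List.append_assoc, List.nil_append, List.cons.injEq, true_and]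
  conv_rhs => rw [hzsplit, hv]

theorem pvScan_cons {a : Char} {w : List Char}
    (h : ∀ c ∈ pvColors, ¬ pvTok c <+: a :: w) :
    pvScan (a :: w) = (a :: (pvScan w).1, (pvScan w).2) := by
  rw [pvScan_cons_eq]
  have hcond : (PySem.Chars.startswith (a :: w) ['[', 'c', ']', '['] &&
      pvColors.contains (((a :: w).drop 4).take 6) &&
      (((a :: w).drop 10).take 1 == [']'])) = false := by
    by_contra hc
    rw [Bool.not_eq_false] at hc
    obtain ⟨c, hm, hp⟩ := pvScan_cond hc
    exact h c hm hp
  rw [if_neg (by rw [hcond]; simp)]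

-- main lemma: the nine while-loops compute exactly the single scan (string and count)
theorem pvMain : ∀ (N : Nat) (s : List Char), s.length ≤ N → ∀ n,
    pvFoldW pvColors (s, n) = ((pvScan s).1, n + (pvScan s).2) := by
  intro N
  induction N with
  | zero =>
    intro s hs n
    have : s = [] := List.eq_nil_of_length_eq_zero (Nat.le_zero.mp hs)
    subst this
    rw [pvF_nil]
    simp [pvScan, pvScanF]
  | succ N ih =>
    intro s hs n
    by_cases hex : ∃ c ∈ pvColors, pvTok c <+: s
    · obtain ⟨c, hcmem, u, hu⟩ := hex
      subst hu
      have hok := pvColors_ok c hcmem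
      obtain ⟨P, S, hPS⟩ := List.append_of_mem hcmem
      have hnd : (P ++ c :: S).Nodup := by rw [← hPS]; exact pvColors_nodup
      rw [List.nodup_append] at hnd
      have hcP : c ∉ P := fun hcp => hnd.2.2 c hcp c (by simp) rfl
      have hcS : c ∉ S := (List.nodup_cons.mp hnd.2.1).1
      have hokP : ∀ c' ∈ P, pvColorOK c' := fun c' h =>
        pvColors_ok c' (by rw [hPS]; exact List.mem_append_left _ h)
      have hokS : ∀ c' ∈ S, pvColorOK c' := fun c' h =>
        pvColors_ok c' (by rw [hPS]; exact List.mem_append_right _ (by simp [h]))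
      have hlen11 : (pvTok c).length = 11 := by simp [pvTok, hok.1]
      have hul : u.length ≤ N := by
        have := hs
        rw [List.length_append, hlen11] at this
        omega
      have ihu := ih u hul n
      -- decompose the fold at color c
      have hsplit : ∀ st, pvFoldW pvColors st = pvFoldW S (pvWhile c (pvFoldW P st)) := by
        intro st
        rw [hPS]
        simp [pvFoldW, List.foldl_append]
      rcases hqP : pvFoldW P (u, n) with ⟨q1, q2⟩
      rcases hw : pvWhile c (q1, q2) with ⟨y1, y2⟩
      rcases hfs : pvFoldW S (y1, y2) with ⟨z1, z2⟩
      have hz : (z1, z2) = ((pvScan u).1, n + (pvScan u).2) := by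
        rw [← hfs, ← hw, ← hqP, ← hsplit (u, n)]
        exact ihu
      -- the left side
      have hfront : pvWhile c (pvTok c ++ q1, q2) = pvWhile c (pvRepl ++ q1, q2 + 1) := by
        rw [pvW_step c (pvTok c ++ q1) q2
            ((PySem.Chars.isIn_iff_infix _ _).mpr (List.prefix_append _ _).isInfix),
          pvReplN_succ_prefix _ 0 (List.prefix_append _ _), pvReplN_zero, List.drop_left]
      calc pvFoldW pvColors (pvTok c ++ u, n)
          = pvFoldW S (pvWhile c (pvFoldW P (pvTok c ++ u, n))) := hsplit _
        _ = pvFoldW S (pvWhile c (pvTok c ++ q1, q2)) := by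
            rw [pvF_pass_tok c hok P hokP hcP u n, hqP]
        _ = pvFoldW S (pvWhile c (pvRepl ++ q1, q2 + 1)) := by rw [hfront]
        _ = pvFoldW S (pvRepl ++ y1, y2 + 1) := by
            rw [pvW_pass c pvRepl (pvPass_repl_isIn c) (pvPass_repl_rep c) q1.length q1 le_rfl,
              pvW_succ, hw]
        _ = (pvRepl ++ z1, z2 + 1) := by
            rw [pvF_pass_repl S y1 (y2 + 1), pvF_succ, hfs]
        _ = ((pvScan (pvTok c ++ u)).1, n + (pvScan (pvTok c ++ u)).2) := by
            rw [pvScan_tok hcmem u]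
            have hz1 : z1 = (pvScan u).1 := congrArg Prod.fst hz
            have hz2 : z2 = n + (pvScan u).2 := congrArg Prod.snd hz
            rw [hz1, hz2]
            simp only [Prod.mk.injEq, true_and]
            omega
    · push Not at hex
      cases s with
      | nil => rw [pvF_nil]; simp [pvScan, pvScanF]
      | cons a w =>
        have hwl : w.length ≤ N := by
          have := hs; simp at this; omega
        rw [pvF_char pvColors pvColors_ok w n a hex, pvScan_cons hex, ih w hwl n]

-- ===== VERDICT (by name: the statement is the Claim_ definition above) =====
theorem fix_desc_spec : Claim_equal_fix_desc := by
  intro desc _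
  have h := pvMain desc.toList.length desc.toList le_rfl 0
  simp only [Spec_fix_desc, fix_desc, fix_desc_alt, h, Nat.zero_add]
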